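-- pv_equiv track=rewrite | github.com/select766/codingame-othello | feature_check/unicode_send/make_decode_offset_table.py | make_encode_offset_table
-- ===== SOURCE A (Python) =====
-- def make_encode_offset_table(charset):
--     last_code_point = -2
--     table = {}
--     for i, c in enumerate(charset):
--         code_point = ord(c)
--         assert code_point > last_code_point
--         if code_point > last_code_point + 1:
--             # 区間が切れている
--             # インデックスi以上の数値は、オフセットcode_pointの付加が必要
--             table[i] = code_point - i
--         last_code_point = code_point
--     # 逆順にする
--     table_rev = {}
--     for k, v in reversed(table.items()):
--         table_rev[k] = v
--     return table_rev
-- ===== SOURCE B (Python) =====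
-- def make_encode_offset_table(charset):
--     cps = [ord(c) for c in charset]
--     # strictly increasing <=> equal to its own sorted set
--     assert cps == sorted(set(cps))
--     # within a maximal run of consecutive code points the offset cp - i is constant,
--     # and offsets are non-decreasing, so first occurrence of each distinct offset
--     # value is exactly a run start: dedup by offset, keeping the first index.
--     first = {}
--     for i, cp in enumerate(cps):
--         first.setdefault(cp - i, i)
--     return {i: d for d, i in reversed(list(first.items()))}
-- ===== Notes on version B (the rewrite author's own statement) =====
-- stated objective: alternative
-- what changed: B never compares adjacent code points to find gaps: it computes the offset cp-i per index and deduplicates by offset value with dict.setdefault (first occurrence wins), since run starts are exactly first occurrences of each distinct offset; the result dict is then rebuilt reversed and swapped in one comprehension.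
import Mathlib
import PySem

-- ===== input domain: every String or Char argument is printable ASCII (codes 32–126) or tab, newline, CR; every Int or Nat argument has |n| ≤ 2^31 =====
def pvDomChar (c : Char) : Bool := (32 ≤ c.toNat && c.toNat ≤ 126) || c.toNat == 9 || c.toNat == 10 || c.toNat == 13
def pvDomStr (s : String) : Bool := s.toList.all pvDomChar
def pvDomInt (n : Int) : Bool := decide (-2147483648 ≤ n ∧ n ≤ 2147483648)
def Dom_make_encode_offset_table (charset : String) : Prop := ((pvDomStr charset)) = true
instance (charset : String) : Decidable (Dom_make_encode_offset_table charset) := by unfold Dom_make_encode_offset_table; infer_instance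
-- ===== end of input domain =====

-- B replaces A's gap-detection pass (compare each code point with the previous one, then
-- reverse the dict) by deduplication on the offset value cp - i via setdefault: run starts
-- are exactly the first occurrences of each distinct offset (objective: alternative).

-- ===== PORT A =====
-- the 'assert code_point > last_code_point' raises outside Pre_; inside Pre_ it always passes, the port continues
def make_encode_offset_table (charset : String) : List (Int × Int) :=
  let step : (Int × PySem.Dict Int Int) → (Int × Char) → (Int × PySem.Dict Int Int) :=
    fun st ic =>
      let cp : Int := (ic.2.toNat : Int)
      (cp, if cp > st.1 + 1 then st.2.insert ic.1 (cp - ic.1) else st.2)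
  let res := (PySem.List.enumerate charset.toList 0).foldl step (-2, PySem.Dict.empty)
  let table_rev := res.2.items.reverse.foldl
    (fun (d : PySem.Dict Int Int) kv => d.insert kv.1 kv.2) PySem.Dict.empty
  table_rev.items

-- ===== PORT B =====
-- B's 'assert cps == sorted(set(cps))' raises exactly where A's assert does (outside Pre_);
-- inside Pre_ it always passes, the port continues
def make_encode_offset_table_alt (charset : String) : List (Int × Int) :=
  let cps : List Int := charset.toList.map (fun c => (c.toNat : Int))
  let first := (PySem.List.enumerate cps 0).foldl
    (fun (d : PySem.Dict Int Int) icp => d.setdefault (icp.2 - icp.1) icp.1) PySem.Dict.empty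
  let res := first.items.reverse.foldl
    (fun (d : PySem.Dict Int Int) kv => d.insert kv.2 kv.1) PySem.Dict.empty
  res.items

-- ===== PRECONDITION & SPEC =====
-- Pre_ excludes exactly the inputs on which A's 'assert code_point > last_code_point' raises
-- AssertionError: charsets whose code points are not strictly increasing (B's assert raises there too).
def Pre_make_encode_offset_table (charset : String) : Prop :=
  List.Pairwise (fun a b => a.toNat < b.toNat) charset.toList
instance (charset : String) : Decidable (Pre_make_encode_offset_table charset) := by
  unfold Pre_make_encode_offset_table; infer_instance
def pvWitness_make_encode_offset_table : String := "ad"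
def Spec_make_encode_offset_table (charset : String) (out : List (Int × Int)) : Prop := out = make_encode_offset_table_alt charset
instance (charset : String) (out : List (Int × Int)) : Decidable (Spec_make_encode_offset_table charset out) := by unfold Spec_make_encode_offset_table; infer_instance

-- ===== CLAIM (what is proved, stated in full; the proofs are below) =====
def Claim_equal_make_encode_offset_table : Prop := ∀ (charset : String), Dom_make_encode_offset_table charset → Pre_make_encode_offset_table charset → Spec_make_encode_offset_table charset (make_encode_offset_table charset)

-- ===== LEMMAS AND PROOFS =====

-- A's forward break list: entries (s+j, cps[j]-(s+j)) at positions j whose code point jumps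
def brkList : List Int → Int → Int → List (Int × Int)
  | [], _, _ => []
  | c :: rest, s, last =>
      (if c > last + 1 then [(s, c - s)] else []) ++ brkList rest (s + 1) c

def condAt (l : List Int) (last : Int) (i : Nat) : Bool :=
  if i = 0 then decide (l.getD 0 0 > last + 1)
  else decide (l.getD i 0 > l.getD (i - 1) 0 + 1)

theorem brkList_eq_filter (l : List Int) : ∀ (s last : Int),
    brkList l s last =
      ((List.range l.length).filter (condAt l last)).map
        (fun (i : Nat) => (s + (i : Int), l.getD i 0 - (s + (i : Int)))) := by
  induction l with
  | nil => intro s last; simp [brkList]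
  | cons c rest ih =>
    intro s last
    have hsucc : ∀ i : Nat, condAt (c :: rest) last (i + 1) = condAt rest c i := by
      intro i
      cases i with
      | zero => simp [condAt]
      | succ j => simp [condAt]
    rw [brkList, ih (s + 1) c]
    show _ = ((List.range (rest.length + 1)).filter (condAt (c :: rest) last)).map _
    rw [List.range_succ_eq_map, List.filter_cons]
    have hc : condAt (c :: rest) last 0 = decide (c > last + 1) := by simp [condAt]
    rw [hc]
    have htail :
        (((List.range rest.length).map Nat.succ).filter (condAt (c :: rest) last)).map
            (fun (i : Nat) => (s + (i : Int), (c :: rest).getD i 0 - (s + (i : Int))))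
          = ((List.range rest.length).filter (condAt rest c)).map
              (fun (i : Nat) => (s + 1 + (i : Int), rest.getD i 0 - (s + 1 + (i : Int)))) := by
      rw [List.filter_map, List.map_map]
      rw [List.filter_congr (fun i _ => by
        simp only [Function.comp_apply, Nat.succ_eq_add_one]; exact hsucc i)]
      apply List.map_congr_left
      intro i _
      simp only [Function.comp_apply, Nat.succ_eq_add_one, List.getD_cons_succ]
      push_cast
      rw [Prod.mk.injEq]
      constructor <;> ring
    by_cases h : c > last + 1
    · rw [decide_eq_true h, if_pos rfl, List.map_cons, htail]
      simp [h]
    · have hd : decide (c > last + 1) = false := by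
        simp only [decide_eq_false_iff_not]; exact h
      rw [hd, if_neg Bool.false_ne_true, htail]
      simp [h]

-- A's fold over enumerate appends brkList to the dict's items (keys stay below the next index)
theorem A_fold (l : List Char) : ∀ (s last : Int) (d : PySem.Dict Int Int),
    (∀ k ∈ d.keys, k < s) →
    (((PySem.List.enumerate l s).foldl
        (fun (st : Int × PySem.Dict Int Int) ic =>
          ((ic.2.toNat : Int),
            if (ic.2.toNat : Int) > st.1 + 1 then st.2.insert ic.1 ((ic.2.toNat : Int) - ic.1) else st.2))
        (last, d)).2).items
      = d.items ++ brkList (l.map (fun c => (c.toNat : Int))) s last := by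
  induction l with
  | nil => intro s last d _; simp [PySem.List.enumerate_nil, brkList]
  | cons c rest ih =>
    intro s last d hd
    rw [PySem.List.enumerate_cons, List.foldl_cons]
    have hns : d.contains s = false := by
      rw [PySem.Dict.contains_eq_decide_mem_keys]
      simp only [decide_eq_false_iff_not]
      intro hmem; exact absurd (hd s hmem) (lt_irrefl s)
    by_cases h : (c.toNat : Int) > last + 1
    · simp only [h, if_true, List.map_cons, brkList, if_true]
      rw [ih (s + 1) (c.toNat : Int) (d.insert s ((c.toNat : Int) - s))
        (by intro k hk
            rcases (PySem.Dict.mem_keys_insert _ _ _ _).1 hk with h1 | h1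
            · omega
            · have := hd k h1; omega)]
      rw [PySem.Dict.items_insert_of_not_contains _ _ hns]
      simp
    · simp only [h, if_false, List.map_cons, brkList]
      rw [ih (s + 1) (c.toNat : Int) d (by intro k hk; have := hd k hk; omega)]
      simp

-- B's setdefault fold appends the SWAPPED break pairs: an offset value cp - i is absent from
-- the dict exactly when a new run starts (cp > last + 1), because offsets are non-decreasing
-- and the largest key present is the previous element's offset
theorem B_fold (l : List Int) : ∀ (s last : Int) (d : PySem.Dict Int Int),
    List.Pairwise (· < ·) (last :: l) →
    (∀ c ∈ l, 0 ≤ c) →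
    (∀ k ∈ d.keys, k ≤ last + 1 - s) →
    (d.contains (last + 1 - s) = true ∨ last + 1 < 0) →
    ((PySem.List.enumerate l s).foldl
        (fun (d : PySem.Dict Int Int) icp => d.setdefault (icp.2 - icp.1) icp.1) d).items
      = d.items ++ (brkList l s last).map Prod.swap := by
  induction l with
  | nil => intro s last d _ _ _ _; simp [PySem.List.enumerate_nil, brkList]
  | cons c rest ih =>
    intro s last d hch hnn hub hcont
    rw [PySem.List.enumerate_cons, List.foldl_cons]
    rcases List.pairwise_cons.1 hch with ⟨hfa, hch'⟩
    have hlt : last < c := hfa c List.mem_cons_self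
    have hch'' : List.Pairwise (· < ·) (c :: rest) := hch'
    by_cases h : c > last + 1
    · -- new run: offset c - s cannot be a key (all keys ≤ last + 1 - s < c - s)
      have hnc : d.contains (c - s) = false := by
        rw [PySem.Dict.contains_eq_decide_mem_keys]
        simp only [decide_eq_false_iff_not]
        intro hmem; have := hub _ hmem; omega
      rw [PySem.Dict.setdefault_of_not_contains _ _ hnc]
      rw [ih (s + 1) c (d.insert (c - s) s) hch''
        (fun x hx => hnn x (List.mem_cons_of_mem _ hx))
        (by intro k hk
            rcases (PySem.Dict.mem_keys_insert _ _ _ _).1 hk with h1 | h1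
            · omega
            · have := hub k h1; omega)
        (Or.inl (by
          rw [PySem.Dict.contains_insert]
          have : (c + 1 - (s + 1) == c - s) = true := by
            simp only [beq_iff_eq]; ring
          rw [this, Bool.true_or]))]
      rw [PySem.Dict.items_insert_of_not_contains _ _ hnc]
      rw [brkList, if_pos h]
      simp [Prod.swap]
    · -- continuing run: c = last + 1, so c - s is already the largest key present
      have hceq : c = last + 1 := by omega
      have hc : d.contains (c - s) = true := by
        rcases hcont with h1 | h1
        · have : last + 1 - s = c - s := by omega
          rw [← this]; exact h1
        · exfalso; have := hnn c List.mem_cons_self; omega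
      rw [PySem.Dict.setdefault_of_contains _ _ hc]
      rw [ih (s + 1) c d hch''
        (fun x hx => hnn x (List.mem_cons_of_mem _ hx))
        (by intro k hk; have := hub k hk; omega)
        (Or.inl (by
          have : c + 1 - (s + 1) = c - s := by ring
          rw [this]; exact hc))]
      rw [brkList, if_neg h]
      simp

-- the final loop over pairwise-distinct keys just appends the pairs
theorem foldl_insert_pairs (L : List (Int × Int)) : ∀ (d : PySem.Dict Int Int),
    (∀ p ∈ L, d.contains p.1 = false) → (L.map Prod.fst).Nodup →
    (L.foldl (fun (d : PySem.Dict Int Int) kv => d.insert kv.1 kv.2) d).items = d.items ++ L := by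
  induction L with
  | nil => intro d _ _; simp
  | cons p L ih =>
    intro d hf hnd
    rw [List.foldl_cons, ih (d.insert p.1 p.2)
      (by intro q hq
          rw [PySem.Dict.contains_insert]
          have h1 : q.1 ≠ p.1 := by
            simp only [List.map_cons, List.nodup_cons] at hnd
            intro he
            exact hnd.1 (he ▸ List.mem_map_of_mem hq)
          simp only [Bool.or_eq_false_iff]
          exact ⟨by simp [h1], hf q (List.mem_cons_of_mem _ hq)⟩)
      (by simp only [List.map_cons, List.nodup_cons] at hnd; exact hnd.2)]
    rw [PySem.Dict.items_insert_of_not_contains _ _ (hf p List.mem_cons_self)]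
    simp

theorem nodup_fst_brkList (cps : List Int) :
    ((brkList cps 0 (-2)).map Prod.fst).Nodup := by
  rw [brkList_eq_filter, List.map_map]
  have hf : (Prod.fst ∘ fun (i : Nat) => ((0 : Int) + (i : Int), cps.getD i 0 - (0 + (i : Int))))
      = fun (i : Nat) => ((i : Int)) := by
    funext i; simp
  rw [hf]
  exact ((List.nodup_range).filter _).map (fun a b hab => by exact_mod_cast hab)

-- ===== VERDICT (by name: the statement is the Claim_ definition above) =====
theorem make_encode_offset_table_spec : Claim_equal_make_encode_offset_table := by
  unfold Claim_equal_make_encode_offset_table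
  intro charset _ hpre
  unfold Spec_make_encode_offset_table
  simp only [make_encode_offset_table, make_encode_offset_table_alt]
  set cps := charset.toList.map (fun c => (c.toNat : Int)) with hcps
  -- A side: the forward pass yields brkList, the reversing loop its reverse
  have hA := A_fold charset.toList 0 (-2) PySem.Dict.empty
    (by intro k hk; rw [PySem.Dict.keys_empty] at hk; simp at hk)
  rw [hA]
  simp only [List.nil_append, show PySem.Dict.empty.items = ([] : List (Int × Int)) from rfl]
  have hnd : ((brkList cps 0 (-2)).reverse.map Prod.fst).Nodup := by
    rw [List.map_reverse, List.nodup_reverse]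
    exact nodup_fst_brkList cps
  rw [foldl_insert_pairs _ _ (by intro p _; exact PySem.Dict.contains_empty _) hnd]
  -- B side: the setdefault fold yields the swapped pairs
  have hchain : List.Pairwise (· < ·) ((-2 : Int) :: cps) := by
    rw [List.pairwise_cons]
    refine ⟨?_, ?_⟩
    · intro a ha
      rcases List.mem_map.1 ha with ⟨c, _, rfl⟩
      have : (0 : Int) ≤ (c.toNat : Int) := by positivity
      omega
    · exact hpre.map _ (by intro a b hab; exact_mod_cast hab)
  have hnn : ∀ c ∈ cps, (0 : Int) ≤ c := by
    intro c hc
    rcases List.mem_map.1 hc with ⟨ch, _, rfl⟩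
    positivity
  have hB := B_fold cps 0 (-2) PySem.Dict.empty hchain hnn
    (by intro k hk; rw [PySem.Dict.keys_empty] at hk; simp at hk)
    (Or.inr (by norm_num))
  rw [hB]
  simp only [List.nil_append, show PySem.Dict.empty.items = ([] : List (Int × Int)) from rfl]
  -- the swapped-insert loop over the reversed swapped pairs rebuilds brkList reversed
  have hswapfold : ∀ (L : List (Int × Int)) (d : PySem.Dict Int Int),
      L.foldl (fun (d : PySem.Dict Int Int) kv => d.insert kv.2 kv.1) d
        = (L.map Prod.swap).foldl (fun (d : PySem.Dict Int Int) kv => d.insert kv.1 kv.2) d := by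
    intro L
    induction L with
    | nil => intro d; rfl
    | cons p L ih => intro d; simp [ih]
  rw [hswapfold]
  have hL : (((brkList cps 0 (-2)).map Prod.swap).reverse).map Prod.swap
      = (brkList cps 0 (-2)).reverse := by
    rw [← List.map_reverse, List.map_map]
    simp
  rw [hL, foldl_insert_pairs _ _ (by intro p _; exact PySem.Dict.contains_empty _) hnd]
  simp only [show (PySem.Dict.empty : PySem.Dict Int Int).items = [] from rfl, List.nil_append]
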